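-- pv_equiv track=rewrite | github.com/Regnaer-Org/TestingWorkflowsOrg | .github/scripts/analyze_hierarchy.py | detect_column_by_values
-- ===== SOURCE A (Python) =====
-- def detect_column_by_values(rows, values_set):
--     """
--     Given a list of rows (dicts), find the column name whose values (case-insensitive)
--     are a subset of the given set (or empty/None).
--     """
--     if not rows:
--         return None
--     columns = rows[0].keys()
--     for col in columns:
--         matched = True
--         for row in rows:
--             val = (row.get(col) or '').strip().lower()
--             if val and val not in values_set:
--                 matched = False
--                 break
--         if matched:
--             return col
--     # Try partial match: column with MOST matches to our set
--     best_col, best_count = None, 0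
--     for col in columns:
--         count = sum(((row.get(col) or '').strip().lower() in values_set) for row in rows)
--         if count > best_count:
--             best_col, best_count = col, count
--     return best_col
-- ===== SOURCE B (Python) =====
-- def detect_column_by_values(rows, values_set):
--     """Single pass over the columns: each column's rows are scanned once,
--     accumulating both the full-match flag and the match count."""
--     if not rows:
--         return None
--     best_col, best_count = None, 0
--     for col in rows[0].keys():
--         full = True
--         count = 0
--         for row in rows:
--             val = (row.get(col) or '').strip().lower()
--             if val in values_set:
--                 count += 1
--             elif val:
--                 full = False
--         if full:
--             return col
--         if count > best_count:
--             best_col, best_count = col, count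
--     return best_col
-- ===== Notes on version B (the rewrite author's own statement) =====
-- stated objective: alternative
-- what changed: B scans the columns once, computing each column's full-match flag and match count in a single pass over its rows and deciding immediately, instead of A's two separate column sweeps (one for full matches, a second recomputing counts for the best partial match).
import Mathlib
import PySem

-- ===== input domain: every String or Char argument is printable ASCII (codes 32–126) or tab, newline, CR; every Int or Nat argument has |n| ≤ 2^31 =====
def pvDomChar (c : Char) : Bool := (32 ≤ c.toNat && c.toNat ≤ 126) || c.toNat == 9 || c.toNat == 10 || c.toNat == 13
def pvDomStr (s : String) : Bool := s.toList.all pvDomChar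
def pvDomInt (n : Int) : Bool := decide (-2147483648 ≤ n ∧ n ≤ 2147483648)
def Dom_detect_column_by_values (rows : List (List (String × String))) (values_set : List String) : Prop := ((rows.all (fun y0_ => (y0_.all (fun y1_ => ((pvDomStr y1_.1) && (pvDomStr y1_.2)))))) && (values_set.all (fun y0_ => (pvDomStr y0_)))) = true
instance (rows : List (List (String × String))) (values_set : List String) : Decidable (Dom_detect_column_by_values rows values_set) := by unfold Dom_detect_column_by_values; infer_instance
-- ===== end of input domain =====

-- B fuses A's two column sweeps into one pass: each column's rows are scanned once,
-- accumulating the full-match flag and the match count together (objective: alternative).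
-- ===== PORT A =====
-- (row.get(col) or '').strip().lower()  — dict lookup is first-match on the assoc list
def pvA_val (row : List (String × String)) (col : String) : String :=
  PySem.Str.lower (PySem.Str.strip ((PySem.Dict.mk row).getD col ""))

-- inner 'for row in rows: … break' of the first loop
def pvA_matched (rows : List (List (String × String))) (col : String) (vs : List String) : Bool :=
  match rows with
  | [] => true
  | row :: rest =>
    let val := pvA_val row col
    if val ≠ "" && !(vs.contains val) then false else pvA_matched rest col vs

-- first loop: return the first column whose values all match
def pvA_first (cols : List String) (rows : List (List (String × String))) (vs : List String) : Option String :=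
  match cols with
  | [] => none
  | c :: cs => if pvA_matched rows c vs then some c else pvA_first cs rows vs

-- sum(((row.get(col) or '').strip().lower() in values_set) for row in rows)
def pvA_count (rows : List (List (String × String))) (col : String) (vs : List String) : Nat :=
  match rows with
  | [] => 0
  | row :: rest => (if vs.contains (pvA_val row col) then 1 else 0) + pvA_count rest col vs

-- second loop: best_col / best_count over all columns
def pvA_fb (cols : List String) (rows : List (List (String × String))) (vs : List String)
    (best : Option String × Nat) : Option String × Nat :=
  match cols with
  | [] => best
  | c :: cs =>
    let cnt := pvA_count rows c vs
    pvA_fb cs rows vs (if cnt > best.2 then (some c, cnt) else best)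

def detect_column_by_values (rows : List (List (String × String))) (values_set : List String) : Option String :=
  match rows with
  | [] => none
  | row0 :: _ =>
    let cols := PySem.List.dedup (row0.map Prod.fst)   -- rows[0].keys()
    match pvA_first cols rows values_set with
    | some c => some c
    | none => (pvA_fb cols rows values_set (none, 0)).1

-- ===== PORT B =====
-- one pass over the rows of a column: (full-match flag, match count)
def pvB_scan (rows : List (List (String × String))) (col : String) (vs : List String) : Bool × Nat :=
  rows.foldl (fun s row =>
    let val := PySem.Str.lower (PySem.Str.strip ((PySem.Dict.mk row).getD col ""))
    if vs.contains val then (s.1, s.2 + 1)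
    else if val ≠ "" then (false, s.2) else s) (true, 0)

-- single sweep over the columns carrying best_col / best_count
def pvB_loop (cols : List String) (rows : List (List (String × String))) (vs : List String)
    (best_col : Option String) (best_count : Nat) : Option String :=
  match cols with
  | [] => best_col
  | c :: cs =>
    let (full, cnt) := pvB_scan rows c vs
    if full then some c
    else if cnt > best_count then pvB_loop cs rows vs (some c) cnt
    else pvB_loop cs rows vs best_col best_count

def detect_column_by_values_alt (rows : List (List (String × String))) (values_set : List String) : Option String :=
  match rows with
  | [] => none
  | row0 :: _ => pvB_loop (PySem.List.dedup (row0.map Prod.fst)) rows values_set none 0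

-- ===== PRECONDITION & SPEC =====
def Spec_detect_column_by_values (rows : List (List (String × String))) (values_set : List String) (out : Option String) : Prop := out = detect_column_by_values_alt rows values_set
instance (rows : List (List (String × String))) (values_set : List String) (out : Option String) : Decidable (Spec_detect_column_by_values rows values_set out) := by unfold Spec_detect_column_by_values; infer_instance

-- ===== CLAIM (what is proved, stated in full; the proofs are below) =====
def Claim_equal_detect_column_by_values : Prop := ∀ (rows : List (List (String × String))) (values_set : List String), Dom_detect_column_by_values rows values_set → Spec_detect_column_by_values rows values_set (detect_column_by_values rows values_set)

-- ===== LEMMAS AND PROOFS =====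

-- B's fused row scan computes exactly A's matched flag and A's count
theorem pvB_scan_eq (rows : List (List (String × String))) (col : String) (vs : List String)
    (s : Bool × Nat) :
    rows.foldl (fun s row =>
      let val := PySem.Str.lower (PySem.Str.strip ((PySem.Dict.mk row).getD col ""))
      if vs.contains val then (s.1, s.2 + 1)
      else if val ≠ "" then (false, s.2) else s) s
    = (s.1 && pvA_matched rows col vs, s.2 + pvA_count rows col vs) := by
  induction rows generalizing s with
  | nil => simp [pvA_matched, pvA_count]
  | cons row rest ih =>
    rw [List.foldl_cons, ih]
    by_cases hc : PySem.Str.lower (PySem.Str.strip ((PySem.Dict.mk row).getD col "")) ∈ vs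
    · simp [pvA_matched, pvA_count, pvA_val, hc]
      omega
    · by_cases he : PySem.Str.lower (PySem.Str.strip ((PySem.Dict.mk row).getD col "")) = ""
      · rw [he] at hc
        simp [pvA_matched, pvA_count, pvA_val, hc, he]
      · simp [pvA_matched, pvA_count, pvA_val, hc, he]

theorem pvB_scan_eq' (rows : List (List (String × String))) (col : String) (vs : List String) :
    pvB_scan rows col vs = (pvA_matched rows col vs, pvA_count rows col vs) := by
  unfold pvB_scan
  rw [pvB_scan_eq]
  simp

-- B's single column sweep equals A's two sweeps, for any carried best state
theorem pvB_loop_eq (cols : List String) (rows : List (List (String × String))) (vs : List String)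
    (bc : Option String) (bn : Nat) :
    pvB_loop cols rows vs bc bn
    = match pvA_first cols rows vs with
      | some c => some c
      | none => (pvA_fb cols rows vs (bc, bn)).1 := by
  induction cols generalizing bc bn with
  | nil => simp [pvB_loop, pvA_first, pvA_fb]
  | cons c cs ih =>
    simp only [pvB_loop, pvA_first, pvA_fb, pvB_scan_eq']
    by_cases hm : pvA_matched rows c vs
    · simp [hm]
    · by_cases hcnt : pvA_count rows c vs > bn
      · simp [hm, hcnt, ih]
      · simp [hm, hcnt, ih]

-- ===== VERDICT (by name: the statement is the Claim_ definition above) =====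
theorem detect_column_by_values_spec : Claim_equal_detect_column_by_values := by
  intro rows vs _
  unfold Spec_detect_column_by_values detect_column_by_values detect_column_by_values_alt
  cases rows with
  | nil => rfl
  | cons row0 rest => simp only [pvB_loop_eq]
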